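-- pv_equiv track=rewrite | github.com/CryptoLoserious/ithillel_study | Python_Basic/homework8.py | find_min_summa_100nums
-- ===== SOURCE A (Python) =====
-- def find_min_summa_100nums(numbers):
--     min_summa = sum(numbers[:10])
--     min_start = 0
--
--     for i in range(1, len(numbers) - 9):
--         current_sum = sum(numbers[i:i + 10])
--         if current_sum < min_summa:
--             min_summa = current_sum
--             min_start = i
--
--     return min_start
-- ===== SOURCE B (Python) =====
-- def find_min_summa_100nums(numbers):
--     # Prefix-sum table: prefix[k] = sum of the first k numbers.
--     prefix = [0]
--     total = 0
--     for x in numbers: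
--         total += x
--         prefix.append(total)
--     min_summa = None
--     min_start = 0
--     for i in range(0, len(numbers) - 9):
--         s = prefix[i + 10] - prefix[i]
--         if min_summa is None or s < min_summa:
--             min_summa = s
--             min_start = i
--     return min_start
-- ===== Notes on version B (the rewrite author's own statement) =====
-- stated objective: faster
-- what changed: Replaced re-summing each length-10 slice with a one-pass prefix-sum table, so every window sum is a single subtraction prefix[i+10]-prefix[i].
import Mathlib
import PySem

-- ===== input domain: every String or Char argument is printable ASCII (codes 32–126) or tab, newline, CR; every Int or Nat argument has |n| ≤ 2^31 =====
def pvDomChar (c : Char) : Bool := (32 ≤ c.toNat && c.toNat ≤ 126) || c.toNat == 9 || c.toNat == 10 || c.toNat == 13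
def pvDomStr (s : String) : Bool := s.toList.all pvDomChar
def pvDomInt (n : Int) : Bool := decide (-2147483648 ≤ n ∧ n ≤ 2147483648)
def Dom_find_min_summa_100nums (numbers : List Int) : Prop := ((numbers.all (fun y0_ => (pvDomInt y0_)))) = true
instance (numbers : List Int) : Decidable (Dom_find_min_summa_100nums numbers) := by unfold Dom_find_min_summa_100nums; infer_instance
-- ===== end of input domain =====

-- B replaces A's per-window re-summing by a one-pass prefix-sum table (faster by a constant factor).

-- ===== PORT A =====
def find_min_summa_100nums (numbers : List Int) : Int :=
  ((PySem.List.pyRange 1 ((numbers.length : Int) - 9) 1).foldl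
    (fun st i =>
      let current_sum := (PySem.List.slice numbers (some i) (some (i + 10))).sum
      if current_sum < st.1 then (current_sum, i) else st)
    ((PySem.List.slice numbers none (some 10)).sum, 0)).2

-- ===== PORT B =====
def find_min_summa_100nums_alt (numbers : List Int) : Int :=
  let pref :=
    (numbers.foldl (fun st x => (st.1 + x, st.2 ++ [st.1 + x])) ((0 : Int), [(0 : Int)])).2
  ((PySem.List.pyRange 0 ((numbers.length : Int) - 9) 1).foldl
    (fun (st : Option Int × Int) i =>
      -- prefix[i+10] and prefix[i]: in range on every index the loop produces, so pyGetD is exact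
      let s := PySem.List.pyGetD pref (i + 10) 0 - PySem.List.pyGetD pref i 0
      match st.1 with
      | none => (some s, i)
      | some m => if s < m then (some s, i) else st)
    (none, 0)).2

-- ===== PRECONDITION & SPEC =====
def Spec_find_min_summa_100nums (numbers : List Int) (out : Int) : Prop := out = find_min_summa_100nums_alt numbers
instance (numbers : List Int) (out : Int) : Decidable (Spec_find_min_summa_100nums numbers out) := by unfold Spec_find_min_summa_100nums; infer_instance

-- ===== CLAIM =====
def Claim_equal_find_min_summa_100nums : Prop := ∀ (numbers : List Int), Dom_find_min_summa_100nums numbers → Spec_find_min_summa_100nums numbers (find_min_summa_100nums numbers)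

-- ===== LEMMAS AND PROOFS =====

-- the prefix-building fold computes the list of partial sums
theorem pvPrefixFold (xs : List Int) : ∀ (t : Int) (acc : List Int),
    (xs.foldl (fun st x => (st.1 + x, st.2 ++ [st.1 + x])) (t, acc)).2
      = acc ++ (List.range xs.length).map (fun k => t + (xs.take (k + 1)).sum) := by
  induction xs with
  | nil => simp
  | cons x xs ih =>
    intro t acc
    simp only [List.foldl_cons, ih (t + x) (acc ++ [t + x]), List.length_cons,
      List.range_succ_eq_map, List.map_cons, List.map_map]
    simp [Function.comp, List.append_assoc, add_assoc]

theorem pvPrefixEq (numbers : List Int) :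
    (numbers.foldl (fun st x => (st.1 + x, st.2 ++ [st.1 + x])) ((0 : Int), [(0 : Int)])).2
      = (List.range (numbers.length + 1)).map (fun k => (numbers.take k).sum) := by
  rw [pvPrefixFold, List.range_succ_eq_map, List.map_cons, List.map_map]
  simp [Function.comp]

-- looking up the prefix table at an in-range integer index
theorem pvPrefixGet (numbers : List Int) (j : Int) (h0 : 0 ≤ j)
    (h1 : j ≤ (numbers.length : Int)) :
    PySem.List.pyGetD ((List.range (numbers.length + 1)).map (fun k => (numbers.take k).sum)) j 0
      = (numbers.take j.toNat).sum := by
  rw [PySem.List.pyGetD_eq_getElem _ 0 h0 (by simp; omega)]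
  simp

-- each window sum as a difference of prefix sums
theorem pvWindow (numbers : List Int) (i : Int) (h0 : 0 ≤ i)
    (h1 : i + 10 ≤ (numbers.length : Int)) :
    PySem.List.pyGetD ((List.range (numbers.length + 1)).map (fun k => (numbers.take k).sum)) (i + 10) 0
      - PySem.List.pyGetD ((List.range (numbers.length + 1)).map (fun k => (numbers.take k).sum)) i 0
      = (PySem.List.slice numbers (some i) (some (i + 10))).sum := by
  rw [pvPrefixGet numbers i h0 (by omega), pvPrefixGet numbers (i + 10) (by omega) h1,
    PySem.List.slice_toNat numbers h0 (by omega)]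
  have hk : (i + 10).toNat - i.toNat = 10 := by omega
  have hk2 : (i + 10).toNat = i.toNat + 10 := by omega
  rw [hk, hk2, List.take_add, List.sum_append]
  ring

-- the two loops run in lockstep once B's accumulator is `some`
theorem pvLoop (numbers : List Int) (l : List Int)
    (hl : ∀ i ∈ l, 0 ≤ i ∧ i + 10 ≤ (numbers.length : Int)) (m s : Int) :
    l.foldl
      (fun (st : Option Int × Int) i =>
        match st.1 with
        | none => (some (PySem.List.pyGetD ((List.range (numbers.length + 1)).map (fun k => (numbers.take k).sum)) (i + 10) 0
            - PySem.List.pyGetD ((List.range (numbers.length + 1)).map (fun k => (numbers.take k).sum)) i 0), i)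
        | some m => if PySem.List.pyGetD ((List.range (numbers.length + 1)).map (fun k => (numbers.take k).sum)) (i + 10) 0
            - PySem.List.pyGetD ((List.range (numbers.length + 1)).map (fun k => (numbers.take k).sum)) i 0 < m
            then (some (PySem.List.pyGetD ((List.range (numbers.length + 1)).map (fun k => (numbers.take k).sum)) (i + 10) 0
              - PySem.List.pyGetD ((List.range (numbers.length + 1)).map (fun k => (numbers.take k).sum)) i 0), i) else st)
      (some m, s)
      = (some (l.foldl
          (fun st i =>
            if (PySem.List.slice numbers (some i) (some (i + 10))).sum < st.1
            then ((PySem.List.slice numbers (some i) (some (i + 10))).sum, i) else st) (m, s)).1,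
         (l.foldl
          (fun st i =>
            if (PySem.List.slice numbers (some i) (some (i + 10))).sum < st.1
            then ((PySem.List.slice numbers (some i) (some (i + 10))).sum, i) else st) (m, s)).2) := by
  induction l generalizing m s with
  | nil => simp
  | cons i l ih =>
    have hi := hl i (by simp)
    have hwin := pvWindow numbers i hi.1 hi.2
    have hl' : ∀ j ∈ l, 0 ≤ j ∧ j + 10 ≤ (numbers.length : Int) :=
      fun j hj => hl j (by simp [hj])
    simp only [List.foldl_cons, hwin]
    by_cases h : (PySem.List.slice numbers (some i) (some (i + 10))).sum < m
    · simpa [h] using ih hl' ((PySem.List.slice numbers (some i) (some (i + 10))).sum) i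
    · simpa [h] using ih hl' m s

-- ===== VERDICT =====
theorem find_min_summa_100nums_spec : Claim_equal_find_min_summa_100nums := by
  intro numbers _
  unfold Spec_find_min_summa_100nums find_min_summa_100nums find_min_summa_100nums_alt
  rw [pvPrefixEq]
  by_cases hn : numbers.length ≤ 9
  · rw [PySem.List.pyRange_one_eq_nil (by omega), PySem.List.pyRange_one_eq_nil (by omega)]
    simp
  · have h0 : (0 : Int) < (numbers.length : Int) - 9 := by omega
    rw [PySem.List.pyRange_one_cons h0]
    have hmem : ∀ i ∈ PySem.List.pyRange 1 ((numbers.length : Int) - 9) 1,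
        0 ≤ i ∧ i + 10 ≤ (numbers.length : Int) := by
      intro i hi; rw [PySem.List.mem_pyRange_one] at hi; omega
    have hs0 := pvWindow numbers 0 le_rfl (by omega)
    rw [show PySem.List.slice numbers (some 0) (some (0 + 10)) = PySem.List.slice numbers none (some 10)
      by norm_num] at hs0
    rw [show (0 : Int) + 10 = 10 by norm_num] at hs0
    simp only [List.foldl_cons, hs0, zero_add, pvLoop numbers _ hmem]
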